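-- pv_equiv track=rewrite | github.com/unverifiedhashcode/LeetCodeProblems | Python/1878. Get Biggest Three Rhombus Sums in a Grid.py | calcBloomSum
-- ===== SOURCE A (Python) =====
-- def calcBloomSum(grid, r, c, bloom):
--     if bloom == 0:
--         return grid[c][r]
--
--     total = 0
--     #Walk each of the 4 sides, bloom steps each
--     #exclude final corner step because we count that by starting at that corner in that side's calculation
--     for i in range(bloom):
--         total += grid[c - bloom + i][r + i]   #Top corner to Right corner
--         total += grid[c + i][r + bloom - i]   #Right corner to Bottom corner
--         total += grid[c + bloom - i][r - i]   #Bottom corner to Left corner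
--         total += grid[c - i][r - bloom + i]   #Left corner to Top corner
--
--     return total
-- ===== SOURCE B (Python) =====
-- def calcBloomSum(grid, r, c, bloom):
--     total = 0
--     for dy in range(-bloom, bloom + 1):
--         dx = bloom - abs(dy)
--         total += grid[c + dy][r + dx]
--         if dx != 0:
--             total += grid[c + dy][r - dx]
--     return total
-- ===== Notes on version B (the rewrite author's own statement) =====
-- stated objective: simpler
-- what changed: B replaces A's four-sided corner-to-corner walk (4 indexed terms per loop step, plus a special bloom==0 base case) by a single row-by-row scan of the diamond: for each dy in [-bloom, bloom] it adds the one or two perimeter cells of that row, which handles bloom==0 and bloom<0 with no special case.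
import Mathlib
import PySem

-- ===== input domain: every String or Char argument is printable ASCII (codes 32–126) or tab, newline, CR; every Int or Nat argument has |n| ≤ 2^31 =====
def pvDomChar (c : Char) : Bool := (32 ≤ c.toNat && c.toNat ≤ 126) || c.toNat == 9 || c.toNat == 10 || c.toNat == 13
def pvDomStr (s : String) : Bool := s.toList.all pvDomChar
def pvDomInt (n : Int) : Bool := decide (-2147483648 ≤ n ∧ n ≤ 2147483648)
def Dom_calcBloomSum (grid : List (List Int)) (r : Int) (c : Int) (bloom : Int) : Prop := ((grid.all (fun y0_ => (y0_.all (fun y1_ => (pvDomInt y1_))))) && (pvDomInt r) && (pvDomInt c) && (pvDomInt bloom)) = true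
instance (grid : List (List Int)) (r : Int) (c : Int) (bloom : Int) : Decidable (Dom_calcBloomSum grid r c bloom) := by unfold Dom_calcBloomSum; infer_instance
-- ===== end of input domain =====

-- B replaces A's four corner-to-corner side walks (plus a bloom==0 base case) by a single
-- row-by-row scan of the diamond (one or two cells per row dy ∈ [-bloom, bloom]); objective: simpler.

-- ===== PORT A =====
-- grid[c][r] with Python index semantics (negative index from the end); total form with
-- default 0, exact under Pre_ (which requires every accessed index in range).
def pvCell (grid : List (List Int)) (i j : Int) : Int :=
  PySem.List.pyGetD (PySem.List.pyGetD grid i []) j 0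

def calcBloomSum (grid : List (List Int)) (r : Int) (c : Int) (bloom : Int) : Int :=
  if bloom = 0 then pvCell grid c r
  else
    (PySem.List.pyRange 0 bloom 1).foldl (fun total i =>
      total + pvCell grid (c - bloom + i) (r + i)
            + pvCell grid (c + i) (r + bloom - i)
            + pvCell grid (c + bloom - i) (r - i)
            + pvCell grid (c - i) (r - bloom + i)) 0

-- ===== PORT B =====
def calcBloomSum_alt (grid : List (List Int)) (r : Int) (c : Int) (bloom : Int) : Int :=
  (PySem.List.pyRange (-bloom) (bloom + 1) 1).foldl (fun total dy =>
    let dx := bloom - |dy|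
    let total' := total + pvCell grid (c + dy) (r + dx)
    if dx ≠ 0 then total' + pvCell grid (c + dy) (r - dx) else total') 0

-- ===== PRECONDITION & SPEC =====
-- Pre_ = exactly the inputs where Python A returns (every accessed perimeter cell exists,
-- counting Python's negative-index wraparound); outside it A raises IndexError.
def Pre_calcBloomSum (grid : List (List Int)) (r : Int) (c : Int) (bloom : Int) : Prop :=
  bloom < 0 ∨
    (-(grid.length : Int) ≤ c - bloom ∧ c + bloom < (grid.length : Int) ∧
      ∀ dy ∈ PySem.List.pyRange (-bloom) (bloom + 1) 1,
        PySem.Raise.InRange (PySem.List.pyGetD grid (c + dy) []).length (r + (bloom - |dy|)) ∧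
        (bloom - |dy| ≠ 0 →
          PySem.Raise.InRange (PySem.List.pyGetD grid (c + dy) []).length (r - (bloom - |dy|))))
instance (grid : List (List Int)) (r : Int) (c : Int) (bloom : Int) : Decidable (Pre_calcBloomSum grid r c bloom) := by
  unfold Pre_calcBloomSum PySem.Raise.InRange; infer_instance

def pvWitness_calcBloomSum : List (List Int) × Int × Int × Int := ([[1, 2, 3], [4, 5, 6], [7, 8, 9]], 1, 1, 1)

def Spec_calcBloomSum (grid : List (List Int)) (r : Int) (c : Int) (bloom : Int) (out : Int) : Prop := out = calcBloomSum_alt grid r c bloom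
instance (grid : List (List Int)) (r : Int) (c : Int) (bloom : Int) (out : Int) : Decidable (Spec_calcBloomSum grid r c bloom out) := by unfold Spec_calcBloomSum; infer_instance

-- ===== CLAIM (what is proved, stated in full; the proofs are below) =====
def Claim_equal_calcBloomSum : Prop := ∀ (grid : List (List Int)) (r : Int) (c : Int) (bloom : Int), Dom_calcBloomSum grid r c bloom → Pre_calcBloomSum grid r c bloom → Spec_calcBloomSum grid r c bloom (calcBloomSum grid r c bloom)

-- ===== LEMMAS AND PROOFS =====

-- the four side terms of A's loop and the per-row term of B's loop, as functions of the index
def pvT1 (G : Int → Int → Int) (r c N : Int) (i : ℕ) : Int := G (c - N + i) (r + i)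
def pvT2 (G : Int → Int → Int) (r c N : Int) (i : ℕ) : Int := G (c + i) (r + N - i)
def pvT3 (G : Int → Int → Int) (r c N : Int) (i : ℕ) : Int := G (c + N - i) (r - i)
def pvT4 (G : Int → Int → Int) (r c N : Int) (i : ℕ) : Int := G (c - i) (r - N + i)
def pvF (G : Int → Int → Int) (r c N : Int) (k : ℕ) : Int :=
  G (c + (-N + k)) (r + (N - |(-N + (k : Int))|)) +
    if N - |(-N + (k : Int))| ≠ 0 then G (c + (-N + k)) (r - (N - |(-N + (k : Int))|)) else 0

theorem pv_sum_map_range (f : ℕ → Int) (n : ℕ) :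
    ((List.range n).map f).sum = ∑ i ∈ Finset.range n, f i := by
  induction n with
  | zero => simp
  | succ n ih => simp [List.range_succ, Finset.sum_range_succ, ih]

theorem pv_sum_range_add (f : ℕ → Int) (a b : ℕ) :
    ∑ k ∈ Finset.range (a + b), f k
      = (∑ k ∈ Finset.range a, f k) + ∑ j ∈ Finset.range b, f (a + j) := by
  induction b with
  | zero => simp
  | succ b ih => rw [Nat.add_succ, Finset.sum_range_succ, ih, Finset.sum_range_succ]; ring

theorem pv_sum_range_rev (h : ℕ → Int) (m : ℕ) :
    ∑ k ∈ Finset.range m, h (m - k) = ∑ k ∈ Finset.range m, h (k + 1) := by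
  rw [← Finset.sum_range_reflect (fun k => h (k + 1)) m]
  refine Finset.sum_congr rfl (fun k hk => ?_)
  rw [Finset.mem_range] at hk
  congr 1
  omega

theorem pv_portA_sum (grid : List (List Int)) (r c : Int) (m : ℕ) :
    calcBloomSum grid r c ((m : Int) + 1)
      = ∑ i ∈ Finset.range (m + 1),
          (pvT1 (pvCell grid) r c ((m : Int) + 1) i + pvT2 (pvCell grid) r c ((m : Int) + 1) i
            + pvT3 (pvCell grid) r c ((m : Int) + 1) i + pvT4 (pvCell grid) r c ((m : Int) + 1) i) := by
  rw [calcBloomSum, if_neg (by omega), PySem.List.pyRange_one]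
  rw [show (((m : Int) + 1) - 0).toNat = m + 1 by omega]
  rw [show (fun k : ℕ => (0 : Int) + k) = (fun k : ℕ => (k : Int)) from funext fun k => by ring]
  rw [List.foldl_map]
  refine Eq.trans (PySem.List.foldl_congr_mem _ _
    (fun (acc : Int) (k : ℕ) =>
      acc + (pvT1 (pvCell grid) r c ((m : Int) + 1) k + pvT2 (pvCell grid) r c ((m : Int) + 1) k
        + pvT3 (pvCell grid) r c ((m : Int) + 1) k + pvT4 (pvCell grid) r c ((m : Int) + 1) k)) _
    ?_) ?_
  · intro acc k _
    simp only [pvT1, pvT2, pvT3, pvT4]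
    ring
  · rw [PySem.List.foldl_add, pv_sum_map_range, zero_add]

theorem pv_portB_sum (grid : List (List Int)) (r c : Int) (m : ℕ) :
    calcBloomSum_alt grid r c ((m : Int) + 1)
      = ∑ k ∈ Finset.range (2 * m + 3), pvF (pvCell grid) r c ((m : Int) + 1) k := by
  rw [calcBloomSum_alt, PySem.List.pyRange_one]
  rw [show (((m : Int) + 1 + 1) - (-((m : Int) + 1))).toNat = 2 * m + 3 by omega]
  rw [List.foldl_map]
  refine Eq.trans (PySem.List.foldl_congr_mem _ _
    (fun (acc : Int) (k : ℕ) => acc + pvF (pvCell grid) r c ((m : Int) + 1) k) _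
    ?_) ?_
  · intro acc k _
    dsimp only [pvF]
    split_ifs <;> ring
  · rw [PySem.List.foldl_add, pv_sum_map_range, zero_add]

theorem pv_diamond_core (G : Int → Int → Int) (r c : Int) (m : ℕ) :
    ∑ k ∈ Finset.range (2 * m + 3), pvF G r c ((m : Int) + 1) k
      = ∑ i ∈ Finset.range (m + 1),
          (pvT1 G r c ((m : Int) + 1) i + pvT2 G r c ((m : Int) + 1) i
            + pvT3 G r c ((m : Int) + 1) i + pvT4 G r c ((m : Int) + 1) i) := by
  have hsplit : 2 * m + 3 = (m + 2) + (m + 1) := by omega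
  rw [hsplit, pv_sum_range_add, Finset.sum_range_succ]
  -- chunk 1: rows above the centre
  have hC1 : ∑ k ∈ Finset.range (m + 1), pvF G r c ((m : Int) + 1) k
      = ∑ k ∈ Finset.range (m + 1),
          (pvT1 G r c ((m : Int) + 1) k + if k = 0 then 0 else pvT4 G r c ((m : Int) + 1) (m + 1 - k)) := by
    refine Finset.sum_congr rfl (fun k hk => ?_)
    rw [Finset.mem_range] at hk
    simp only [pvF, pvT1, pvT4]
    have habs : |(-(((m : Int) + 1)) + (k : Int))| = ((m : Int) + 1) - k := by
      rw [abs_of_nonpos (by omega)]; ring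
    rw [habs]
    by_cases hk0 : k = 0
    · subst hk0
      rw [if_neg (by push_cast; omega), if_pos rfl]
      congr 1 <;> push_cast <;> ring
    · rw [if_pos (by push_cast; omega), if_neg hk0]
      have h1 : ((m + 1 - k : ℕ) : Int) = (m : Int) + 1 - k := by omega
      congr 1
      · congr 1 <;> ring
      · rw [h1]; congr 1 <;> ring
  -- chunk 2: the centre row
  have hC2 : pvF G r c ((m : Int) + 1) (m + 1)
      = pvT2 G r c ((m : Int) + 1) 0 + pvT4 G r c ((m : Int) + 1) 0 := by
    simp only [pvF, pvT2, pvT4]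
    have habs : |(-(((m : Int) + 1)) + ((m + 1 : ℕ) : Int))| = 0 := by
      rw [abs_eq_zero]; push_cast; ring
    rw [habs, if_pos (by omega)]
    congr 1 <;> (congr 1 <;> push_cast <;> ring)
  -- chunk 3: rows below the centre
  have hC3 : ∑ j ∈ Finset.range (m + 1), pvF G r c ((m : Int) + 1) ((m + 2) + j)
      = ∑ j ∈ Finset.range (m + 1),
          (pvT2 G r c ((m : Int) + 1) (j + 1) + if j = m then 0 else pvT3 G r c ((m : Int) + 1) (m - j)) := by
    refine Finset.sum_congr rfl (fun j hj => ?_)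
    rw [Finset.mem_range] at hj
    simp only [pvF, pvT2, pvT3]
    have habs : |(-(((m : Int) + 1)) + ((m + 2 + j : ℕ) : Int))| = (j : Int) + 1 := by
      rw [abs_of_nonneg (by push_cast; omega)]; push_cast; ring
    rw [habs]
    by_cases hjm : j = m
    · subst hjm
      rw [if_neg (by push_cast; omega), if_pos rfl]
      congr 1 <;> push_cast <;> ring
    · rw [if_pos (by push_cast; omega), if_neg hjm]
      have h1 : ((m - j : ℕ) : Int) = (m : Int) - j := by omega
      congr 1
      · congr 1 <;> push_cast <;> ring
      · rw [h1]; congr 1 <;> push_cast <;> ring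
  rw [hC1, hC2, hC3]
  rw [Finset.sum_add_distrib, Finset.sum_add_distrib]
  -- simplify the two ite-sums
  have hT4 : ∑ k ∈ Finset.range (m + 1),
      (if k = 0 then 0 else pvT4 G r c ((m : Int) + 1) (m + 1 - k))
      = ∑ k ∈ Finset.range m, pvT4 G r c ((m : Int) + 1) (k + 1) := by
    have hstep : ∑ k ∈ Finset.range m,
        (if k + 1 = 0 then 0 else pvT4 G r c ((m : Int) + 1) (m + 1 - (k + 1)))
        = ∑ k ∈ Finset.range m, pvT4 G r c ((m : Int) + 1) (m - k) :=
      Finset.sum_congr rfl (fun k _ => by rw [if_neg k.succ_ne_zero, Nat.succ_sub_succ])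
    rw [Finset.sum_range_succ', hstep, if_pos rfl, add_zero,
      pv_sum_range_rev (pvT4 G r c ((m : Int) + 1)) m]
  have hT3 : ∑ j ∈ Finset.range (m + 1),
      (if j = m then 0 else pvT3 G r c ((m : Int) + 1) (m - j))
      = ∑ j ∈ Finset.range m, pvT3 G r c ((m : Int) + 1) (j + 1) := by
    have hstep : ∑ j ∈ Finset.range m,
        (if j = m then 0 else pvT3 G r c ((m : Int) + 1) (m - j))
        = ∑ j ∈ Finset.range m, pvT3 G r c ((m : Int) + 1) (m - j) :=
      Finset.sum_congr rfl (fun j hj => by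
        rw [Finset.mem_range] at hj; rw [if_neg (by omega)])
    rw [Finset.sum_range_succ, if_pos rfl, add_zero, hstep,
      pv_sum_range_rev (pvT3 G r c ((m : Int) + 1)) m]
  have hT2 : ∑ j ∈ Finset.range (m + 1), pvT2 G r c ((m : Int) + 1) (j + 1)
      = (∑ j ∈ Finset.range m, pvT2 G r c ((m : Int) + 1) (j + 1)) + pvT3 G r c ((m : Int) + 1) 0 := by
    rw [Finset.sum_range_succ]
    congr 1
    simp only [pvT2, pvT3]
    congr 1 <;> push_cast <;> ring
  rw [hT4, hT2, hT3]
  rw [Finset.sum_add_distrib, Finset.sum_add_distrib, Finset.sum_add_distrib]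
  rw [Finset.sum_range_succ' (pvT2 G r c ((m : Int) + 1)) m,
      Finset.sum_range_succ' (pvT3 G r c ((m : Int) + 1)) m,
      Finset.sum_range_succ' (pvT4 G r c ((m : Int) + 1)) m]
  ring

theorem pv_AB_eq (grid : List (List Int)) (r c bloom : Int) :
    calcBloomSum grid r c bloom = calcBloomSum_alt grid r c bloom := by
  rcases lt_trichotomy bloom 0 with hneg | hz | hpos
  · rw [calcBloomSum, calcBloomSum_alt, if_neg (by omega),
        PySem.List.pyRange_one_eq_nil (by omega), PySem.List.pyRange_one_eq_nil (by omega)]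
    rfl
  · subst hz
    rw [calcBloomSum, calcBloomSum_alt, if_pos rfl]
    rw [show PySem.List.pyRange (-(0 : Int)) ((0 : Int) + 1) 1 = [0] by decide]
    simp
  · obtain ⟨m, rfl⟩ : ∃ m : ℕ, bloom = (m : Int) + 1 :=
      ⟨(bloom - 1).toNat, by omega⟩
    rw [pv_portA_sum, pv_portB_sum, pv_diamond_core]

-- ===== VERDICT (by name: the statement is the Claim_ definition above) =====
theorem calcBloomSum_spec : Claim_equal_calcBloomSum := by
  intro grid r c bloom _ _
  unfold Spec_calcBloomSum
  exact pv_AB_eq grid r c bloom
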